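-- pv_equiv track=rewrite | github.com/pypi-data/pypi-mirror-370 | packages/lexer-fdfattor-2025/lexer_fdfattor_2025-1.0.1.tar.gz/lexer_fdfattor_2025-1.0.1/lexer/core.py | afd_parentesis_izquierdo
-- ===== SOURCE A (Python) =====
-- ESTADO_FINAL = "ESTADO FINAL"
--
-- ESTADO_NO_FINAL = "NO ACEPTADO"
--
-- ESTADO_TRAMPA = "EN ESTADO TRAMPA"
--
-- def afd_parentesis_izquierdo(lexema):
--     estado = 0
--     estados_finales = [1]
--     for c in lexema:
--         if estado == 0 and c == '(':
--             estado = 1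
--         else:
--             estado = -1
--
--     if estado == -1:
--         return ESTADO_TRAMPA
--     if estado in estados_finales:
--         return ESTADO_FINAL
--     else:
--         return ESTADO_NO_FINAL
-- ===== SOURCE B (Python) =====
-- ESTADO_FINAL = "ESTADO FINAL"
-- ESTADO_NO_FINAL = "NO ACEPTADO"
-- ESTADO_TRAMPA = "EN ESTADO TRAMPA"
--
-- def afd_parentesis_izquierdo(lexema):
--     if lexema == '(':
--         return ESTADO_FINAL
--     if lexema == '':
--         return ESTADO_NO_FINAL
--     return ESTADO_TRAMPA
-- ===== Notes on version B (the rewrite author's own statement) =====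
-- stated objective: simpler
-- what changed: Replaced the character-by-character DFA state loop with a direct three-way dispatch comparing the whole lexeme: the single accepting string maps to FINAL, the empty string to NO_FINAL, everything else to TRAMPA.
import Mathlib
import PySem

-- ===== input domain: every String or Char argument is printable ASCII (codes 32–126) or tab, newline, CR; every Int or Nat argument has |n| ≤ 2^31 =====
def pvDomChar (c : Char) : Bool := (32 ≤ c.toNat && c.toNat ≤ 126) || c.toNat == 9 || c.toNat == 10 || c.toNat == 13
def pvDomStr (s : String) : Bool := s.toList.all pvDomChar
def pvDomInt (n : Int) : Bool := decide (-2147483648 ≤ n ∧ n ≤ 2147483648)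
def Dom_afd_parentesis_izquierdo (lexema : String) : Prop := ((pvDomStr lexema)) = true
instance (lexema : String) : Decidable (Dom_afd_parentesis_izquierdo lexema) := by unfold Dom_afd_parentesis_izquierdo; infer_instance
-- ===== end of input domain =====

-- B replaces A's per-character DFA loop by a direct comparison of the whole string (simpler).

-- ===== PORT A =====
-- the loop body: state transition of A's for-loop
def afdStepA (estado : Int) (c : Char) : Int :=
  if estado = 0 ∧ c = '(' then 1 else -1

def afd_parentesis_izquierdo (lexema : String) : String :=
  let estado := lexema.toList.foldl afdStepA 0
  let estados_finales : List Int := [1]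
  if estado = -1 then "EN ESTADO TRAMPA"
  else if estado ∈ estados_finales then "ESTADO FINAL"
  else "NO ACEPTADO"

-- ===== PORT B =====
def afd_parentesis_izquierdo_alt (lexema : String) : String :=
  if lexema = "(" then "ESTADO FINAL"
  else if lexema = "" then "NO ACEPTADO"
  else "EN ESTADO TRAMPA"

-- ===== PRECONDITION & SPEC =====
def Spec_afd_parentesis_izquierdo (lexema : String) (out : String) : Prop := out = afd_parentesis_izquierdo_alt lexema
instance (lexema : String) (out : String) : Decidable (Spec_afd_parentesis_izquierdo lexema out) := by unfold Spec_afd_parentesis_izquierdo; infer_instance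

-- ===== CLAIM (what is proved, stated in full; the proofs are below) =====
def Claim_equal_afd_parentesis_izquierdo : Prop := ∀ (lexema : String), Dom_afd_parentesis_izquierdo lexema → Spec_afd_parentesis_izquierdo lexema (afd_parentesis_izquierdo lexema)

-- ===== LEMMAS AND PROOFS =====

-- once in the trap state -1, the loop stays there
theorem afdStepA_trap (l : List Char) : l.foldl afdStepA (-1) = -1 := by
  induction l with
  | nil => rfl
  | cons c l ih => simpa [afdStepA] using ih

theorem afd_eq (lexema : String) :
    afd_parentesis_izquierdo lexema = afd_parentesis_izquierdo_alt lexema := by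
  have t1 : "(".toList = ['('] := by decide
  have t2 : "".toList = ([] : List Char) := by decide
  have e1 : (lexema = "(") ↔ (lexema.toList = ['(']) := by
    rw [← String.toList_inj, t1]
  have e2 : (lexema = "") ↔ (lexema.toList = []) := by
    rw [← String.toList_inj, t2]
  have hB : afd_parentesis_izquierdo_alt lexema =
      (if lexema.toList = ['('] then "ESTADO FINAL"
       else if lexema.toList = [] then "NO ACEPTADO"
       else "EN ESTADO TRAMPA") := by
    simp only [afd_parentesis_izquierdo_alt, e1, e2]
  rw [hB]
  unfold afd_parentesis_izquierdo
  match h : lexema.toList with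
  | [] => simp
  | c :: rest =>
    by_cases hc : c = '('
    · subst hc
      match rest with
      | [] => simp [List.foldl, afdStepA]
      | d :: rest' =>
        have h1 : (('(' :: d :: rest').foldl afdStepA 0) = -1 := by
          simp [List.foldl, afdStepA, afdStepA_trap]
        simp [h1]
    · have h1 : ((c :: rest).foldl afdStepA 0) = -1 := by
        simp [List.foldl, afdStepA, hc, afdStepA_trap]
      simp [h1, hc]

-- ===== VERDICT (by name: the statement is the Claim_ definition above) =====
theorem afd_parentesis_izquierdo_spec : Claim_equal_afd_parentesis_izquierdo := by
  intro lexema _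
  unfold Spec_afd_parentesis_izquierdo
  exact afd_eq lexema
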